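-- pv_equiv track=rewrite | github.com/zt-robinson/GreenBook | scripts/seed_hole_yardages.py | valid_par_sequence
-- ===== SOURCE A (Python) =====
-- def valid_par_sequence(pars):
--     if pars[0] == 3 or pars[1] == 3 or pars[17] == 3:
--         return False
--     for i in range(len(pars) - 2):
--         trio = [pars[i], pars[i+1], pars[i+2]]
--         if 4 not in trio:
--             return False
--         if all(p in (3, 5) for p in trio):
--             return False
--         if trio == [3, 5, 3] or trio == [5, 3, 5]:
--             return False
--     return True
-- ===== SOURCE B (Python) =====
-- def valid_par_sequence(pars):
--     if pars[0] == 3 or pars[1] == 3 or pars[17] == 3: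
--         return False
--     streak = 0
--     for p in pars:
--         if p == 4:
--             streak = 0
--         else:
--             streak += 1
--             if streak == 3:
--                 return False
--     return True
-- ===== Notes on version B (the rewrite author's own statement) =====
-- stated objective: simpler
-- what changed: Replaces the overlapping-trio window scan (with its unreachable par-3/par-5 pattern checks) by a single pass keeping a counter of consecutive non-4 pars, failing as soon as it reaches 3.
import Mathlib
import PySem

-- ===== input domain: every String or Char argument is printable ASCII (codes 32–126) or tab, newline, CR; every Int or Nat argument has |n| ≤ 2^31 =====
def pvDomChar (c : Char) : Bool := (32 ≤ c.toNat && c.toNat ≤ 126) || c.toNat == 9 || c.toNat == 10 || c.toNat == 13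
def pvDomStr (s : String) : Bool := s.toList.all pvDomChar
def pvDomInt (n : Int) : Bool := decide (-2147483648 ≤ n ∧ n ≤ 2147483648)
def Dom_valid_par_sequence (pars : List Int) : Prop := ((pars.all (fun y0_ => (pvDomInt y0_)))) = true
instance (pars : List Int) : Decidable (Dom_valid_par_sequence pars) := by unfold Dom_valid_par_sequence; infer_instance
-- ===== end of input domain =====

-- B replaces A's overlapping-trio window scan (whose par-3/par-5 pattern branches are unreachable)
-- by a single pass counting consecutive non-4 pars; same return value on lists of length ≥ 18.


-- ===== PORT A =====
-- loop body for one trio of consecutive pars (the three 'return False' tests, in order)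
def aBody (t0 t1 t2 : Int) : Bool :=
  let trio : List Int := [t0, t1, t2]
  if !(trio.contains 4) then false
  else if trio.all (fun p => p == 3 || p == 5) then false
  else if (trio == [3, 5, 3] || trio == [5, 3, 5]) then false
  else true

-- range(len(pars) - 2): List.range over Nat is exact, since a negative Python range is empty
-- exactly where Nat truncation yields 0; every index used inside the loop is in range, so
-- pyGetD is exact there (under Pre_ the three guard indexings are in range too).
def valid_par_sequence (pars : List Int) : Bool :=
  if PySem.List.pyGetD pars 0 0 == 3 || PySem.List.pyGetD pars 1 0 == 3
      || PySem.List.pyGetD pars 17 0 == 3 then false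
  else
    (List.range (pars.length - 2)).all fun i =>
      aBody (PySem.List.pyGetD pars (i : Int) 0)
            (PySem.List.pyGetD pars ((i : Int) + 1) 0)
            (PySem.List.pyGetD pars ((i : Int) + 2) 0)

-- ===== PORT B =====
-- the for-loop of Source B: streak of consecutive non-4 pars
def altLoop : List Int → Int → Bool
  | [], _ => true
  | p :: rest, streak =>
    if p == 4 then altLoop rest 0
    else if streak + 1 == 3 then false
    else altLoop rest (streak + 1)

def valid_par_sequence_alt (pars : List Int) : Bool :=
  if PySem.List.pyGetD pars 0 0 == 3 || PySem.List.pyGetD pars 1 0 == 3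
      || PySem.List.pyGetD pars 17 0 == 3 then false
  else altLoop pars 0

-- ===== PRECONDITION & SPEC =====
-- Pre_ excludes exactly the inputs where A raises IndexError: lists shorter than 18 whose
-- short-circuited guard reaches index 17 (i.e. neither the first nor the second par is 3).
def Pre_valid_par_sequence (pars : List Int) : Prop :=
  18 ≤ pars.length ∨ (1 ≤ pars.length ∧ pars.getD 0 0 = 3) ∨ (2 ≤ pars.length ∧ pars.getD 1 0 = 3)
instance (pars : List Int) : Decidable (Pre_valid_par_sequence pars) := by
  unfold Pre_valid_par_sequence; infer_instance
def pvWitness_valid_par_sequence : List Int :=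
  [4, 4, 4, 4, 4, 4, 4, 4, 4, 4, 4, 4, 4, 4, 4, 4, 4, 4]
def Spec_valid_par_sequence (pars : List Int) (out : Bool) : Prop := out = valid_par_sequence_alt pars
instance (pars : List Int) (out : Bool) : Decidable (Spec_valid_par_sequence pars out) := by unfold Spec_valid_par_sequence; infer_instance

-- ===== CLAIM (what is proved, stated in full; the proofs are below) =====
def Claim_equal_valid_par_sequence : Prop := ∀ (pars : List Int), Dom_valid_par_sequence pars → Pre_valid_par_sequence pars → Spec_valid_par_sequence pars (valid_par_sequence pars)

-- ===== LEMMAS AND PROOFS =====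

-- "no window of 3 consecutive pars is free of a 4"
def noTriple : List Int → Bool
  | a :: b :: c :: t => (a == 4 || b == 4 || c == 4) && noTriple (b :: c :: t)
  | _ => true

-- A's three tests on a trio collapse to membership of 4: the other two branches fire only
-- on trios without a 4, already rejected by the first test.
lemma aBody_eq (t0 t1 t2 : Int) : aBody t0 t1 t2 = (t0 == 4 || t1 == 4 || t2 == 4) := by
  by_cases h0 : t0 = 4 <;> by_cases h1 : t1 = 4 <;> by_cases h2 : t2 = 4 <;>
    simp [aBody, h0, h1, h2] <;> simp [Ne.symm h0, Ne.symm h1, Ne.symm h2] <;> exact ⟨⟨h0, h1⟩, h2⟩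

lemma windows : ∀ l : List Int,
    ((List.range (l.length - 2)).all fun k =>
      (l.getD k 0 == 4 || l.getD (k + 1) 0 == 4 || l.getD (k + 2) 0 == 4)) = noTriple l
  | [] => by simp [noTriple]
  | [a] => by simp [noTriple]
  | [a, b] => by simp [noTriple]
  | a :: b :: c :: t => by
    have ih := windows (b :: c :: t)
    have hlen : (a :: b :: c :: t).length - 2 = t.length + 1 := by simp
    have hlen' : (b :: c :: t).length - 2 = t.length := by simp
    rw [hlen'] at ih
    rw [hlen, List.range_succ_eq_map]
    simp only [List.all_cons, List.all_map, Function.comp_def, Nat.succ_eq_add_one,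
      List.getD_cons_succ, List.getD_cons_zero, noTriple] at ih ⊢
    rw [ih]

lemma aloop_eq (l : List Int) :
    ((List.range (l.length - 2)).all fun i =>
      aBody (PySem.List.pyGetD l (i : Int) 0)
            (PySem.List.pyGetD l ((i : Int) + 1) 0)
            (PySem.List.pyGetD l ((i : Int) + 2) 0)) = noTriple l := by
  have h1 : ∀ k : Nat, ((k : Int) + 1) = ((k + 1 : Nat) : Int) := by intro k; push_cast; ring
  have h2 : ∀ k : Nat, ((k : Int) + 2) = ((k + 2 : Nat) : Int) := by intro k; push_cast; ring
  rw [← windows l]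
  congr 1
  funext k
  rw [aBody_eq, h1 k, h2 k]
  simp only [PySem.List.pyGetD_natCast]

lemma noTriple_four_cons (r : List Int) : noTriple (4 :: r) = noTriple r := by
  match r with
  | [] => rfl
  | [c] => rfl
  | c :: d :: t => simp [noTriple]

lemma noTriple_mid_four (b : Int) (t : List Int) : noTriple (b :: 4 :: t) = noTriple t := by
  match t with
  | [] => rfl
  | d :: t' => simp [noTriple, noTriple_four_cons]

-- the value of Source B's loop for the three reachable streak values
def g2 : List Int → Bool
  | [] => true
  | a :: r => a == 4 && noTriple r

def g1 : List Int → Bool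
  | [] => true
  | a :: r => if a == 4 then noTriple r else g2 r

lemma noTriple_cons (a : Int) (r : List Int) :
    noTriple (a :: r) = if a == 4 then noTriple r else g1 r := by
  by_cases ha : a = 4
  · simp [ha, noTriple_four_cons]
  · have ha' : (a == (4 : Int)) = false := by simp [ha]
    match r with
    | [] => simp [noTriple, g1, ha']
    | [b] => simp [noTriple, g1, g2, ha']
    | b :: c :: t =>
      by_cases hb : b = 4
      · simp [noTriple, g1, ha', hb, noTriple_four_cons]
      · have hb' : (b == (4 : Int)) = false := by simp [hb]
        by_cases hc : c = 4
        · simp [noTriple, g1, g2, ha', hb', hc, noTriple_mid_four]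
        · have hc' : (c == (4 : Int)) = false := by simp [hc]
          simp [noTriple, g1, g2, ha', hb', hc']

lemma altLoop_spec : ∀ l : List Int,
    altLoop l 0 = noTriple l ∧ altLoop l 1 = g1 l ∧ altLoop l 2 = g2 l
  | [] => by simp [altLoop, noTriple, g1, g2]
  | a :: r => by
    obtain ⟨ih0, ih1, ih2⟩ := altLoop_spec r
    refine ⟨?_, ?_, ?_⟩
    · rw [noTriple_cons]
      by_cases ha : a = 4 <;> simp [altLoop, ha, ih0, ih1]
    · by_cases ha : a = 4 <;> simp [altLoop, g1, ha, ih0, ih2]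
    · by_cases ha : a = 4 <;> simp [altLoop, g2, ha, ih0]

-- ===== VERDICT (by name: the statement is the Claim_ definition above) =====
theorem valid_par_sequence_spec : Claim_equal_valid_par_sequence := by
  intro pars _ _
  unfold Spec_valid_par_sequence valid_par_sequence valid_par_sequence_alt
  split
  · rfl
  · rw [aloop_eq, (altLoop_spec pars).1]
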